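-- pv_equiv track=rewrite | github.com/nasa/ziggy | src/main/python/hdf5mi/hdf5.py | _name_from_index
-- ===== SOURCE A (Python) =====
-- def _name_from_index(name, index, original_shape):
--
--     # determine the "size" of each dimension -- that is to say, how many elements we
--     # have to go before the dimension's index can imcrement. Example: for an array of
--     # original dimensions 3 x 4 x 5, we need to be on the 20th element for the first
--     # index to change, on the 5th element for the 2nd index to change, but the last index
--     # can change for every step through the array
--
--     array_size = list()
--     n_dims = len(original_shape)
--     for i in range(n_dims):
--         this_size = 1
--         if i < n_dims - 1:
--             for j in range(i+1,n_dims):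
--                 this_size = this_size * original_shape[j]
--         array_size.append(int(this_size))
--
--     # find the value of each subscript by taking the index and dividing by the
--     # array_size for that subscript. Then compute the remainder so that the same
--     # calculation will work for the next subscript.
--     specific_name = name
--     for i in range(n_dims):
--         subscript = index // array_size[i]
--         index = index - subscript * array_size[i]
--         specific_name = specific_name + "-" + str(subscript)
--
--     return specific_name
-- ===== SOURCE B (Python) =====
-- def _name_from_index(name, index, original_shape):
--     # Single suffix-product pass for the strides (O(n) instead of O(n^2)),
--     # then one divmod per dimension; parts joined at the end.
--     strides = []
--     acc = 1
--     for size in reversed(original_shape):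
--         strides.append(acc)
--         acc = acc * size
--     parts = [name]
--     for stride in reversed(strides):
--         sub, index = divmod(index, stride)
--         parts.append(str(sub))
--     return "-".join(parts)
-- ===== Notes on version B (the rewrite author's own statement) =====
-- stated objective: faster
-- what changed: B replaces A's nested per-dimension suffix-product loop (O(n^2) multiplications) with a single reverse-pass accumulation of the strides, then unravels the index with one divmod per dimension and joins the parts at the end.
import Mathlib
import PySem

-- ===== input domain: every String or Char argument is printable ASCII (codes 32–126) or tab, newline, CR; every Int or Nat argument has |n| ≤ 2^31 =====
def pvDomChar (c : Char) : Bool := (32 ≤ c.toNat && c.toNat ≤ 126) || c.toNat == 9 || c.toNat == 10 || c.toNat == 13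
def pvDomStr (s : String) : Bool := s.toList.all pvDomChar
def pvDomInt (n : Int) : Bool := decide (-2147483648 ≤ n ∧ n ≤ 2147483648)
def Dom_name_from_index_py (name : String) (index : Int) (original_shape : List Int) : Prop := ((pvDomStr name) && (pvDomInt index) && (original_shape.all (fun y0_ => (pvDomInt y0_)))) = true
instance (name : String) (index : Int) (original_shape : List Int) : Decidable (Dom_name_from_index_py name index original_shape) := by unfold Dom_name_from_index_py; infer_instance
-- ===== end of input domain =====

-- B computes the per-dimension strides in one reverse suffix-product pass (A rebuilds each
-- suffix product with a nested loop) and joins the subscript parts at the end.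

-- ===== PORT A =====
-- inner loop 'this_size = 1; if i < n-1: for j in range(i+1, n): this_size *= original_shape[j]'
-- (index j is always in range, so shape[j] is ported as getD j 0)
def nfiA_inner (shape : List Int) (i n : Nat) : Int :=
  if i < n - 1 then (List.range' (i + 1) (n - (i + 1))).foldl (fun t j => t * shape.getD j 0) 1
  else 1

def name_from_index_py (name : String) (index : Int) (original_shape : List Int) : String :=
  let n := original_shape.length
  let arraySize := (List.range n).foldl (fun acc i => acc ++ [nfiA_inner original_shape i n]) []
  let fin := (List.range n).foldl (fun (st : Int × List Char) i =>
      let sz := arraySize.getD i 0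
      let sub := PySem.Int.floordiv st.1 sz
      (st.1 - sub * sz, st.2 ++ '-' :: PySem.Int.toChars sub)) (index, name.toList)
  String.ofList fin.2

-- ===== PORT B =====
def name_from_index_py_alt (name : String) (index : Int) (original_shape : List Int) : String :=
  let strides := (original_shape.reverse.foldl
      (fun (st : List Int × Int) size => (st.1 ++ [st.2], st.2 * size)) ([], 1)).1
  let fin := strides.reverse.foldl (fun (st : List (List Char) × Int) stride =>
      (st.1 ++ [PySem.Int.toChars (PySem.Int.floordiv st.2 stride)], PySem.Int.mod st.2 stride))
      ([name.toList], index)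
  String.ofList (PySem.Chars.join ['-'] fin.1)

-- ===== PRECONDITION & SPEC =====
-- Pre_ excludes exactly the inputs where some dimension after the first is 0: there A's
-- '//' (and B's divmod) raises ZeroDivisionError.
def Pre_name_from_index_py (_name : String) (_index : Int) (original_shape : List Int) : Prop :=
  ∀ x ∈ original_shape.drop 1, x ≠ 0
instance (name : String) (index : Int) (original_shape : List Int) : Decidable (Pre_name_from_index_py name index original_shape) := by unfold Pre_name_from_index_py; infer_instance

def pvWitness_name_from_index_py : String × Int × List Int := ("arr", 37, [3, 4, 5])

def Spec_name_from_index_py (name : String) (index : Int) (original_shape : List Int) (out : String) : Prop := out = name_from_index_py_alt name index original_shape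
instance (name : String) (index : Int) (original_shape : List Int) (out : String) : Decidable (Spec_name_from_index_py name index original_shape out) := by unfold Spec_name_from_index_py; infer_instance

-- ===== CLAIM (what is proved, stated in full; the proofs are below) =====
def Claim_equal_name_from_index_py : Prop := ∀ (name : String) (index : Int) (original_shape : List Int), Dom_name_from_index_py name index original_shape → Pre_name_from_index_py name index original_shape → Spec_name_from_index_py name index original_shape (name_from_index_py name index original_shape)

-- ===== LEMMAS AND PROOFS =====

-- the common strides list: strides l = [prod (drop 1 l), prod (drop 2 l), …, 1]
def nfiStrides : List Int → List Int
  | [] => []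
  | _ :: t => t.prod :: nfiStrides t

theorem nfiStrides_length (l : List Int) : (nfiStrides l).length = l.length := by
  induction l with
  | nil => rfl
  | cons a t ih => simp [nfiStrides, ih]

theorem foldl_push_eq_map {α β : Type} (f : α → β) :
    ∀ (l : List α) (acc : List β),
      l.foldl (fun acc i => acc ++ [f i]) acc = acc ++ l.map f := by
  intro l
  induction l with
  | nil => simp
  | cons a t ih => intro acc; simp [List.foldl_cons, ih]

theorem map_getD_range (l : List Int) :
    (List.range l.length).map (fun j => l.getD j 0) = l := by
  induction l with
  | nil => rfl
  | cons a t ih =>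
    simp only [List.length_cons, List.range_succ_eq_map, List.map_cons, List.map_map]
    simpa using ih

theorem foldl_range_getD {α : Type} (f : α → Int → α) (l : List Int) (init : α) :
    (List.range l.length).foldl (fun st i => f st (l.getD i 0)) init = l.foldl f init := by
  have h := congrArg (fun xs => xs.foldl f init) (map_getD_range l)
  simpa [List.foldl_map] using h

theorem foldl_mul_eq_prod (l : List Int) : l.foldl (· * ·) 1 = l.prod := by
  simp [List.prod_eq_foldl]

theorem inner_eq_prod_drop (shape : List Int) (i : Nat) (hi : i < shape.length) :
    nfiA_inner shape i shape.length = (shape.drop (i + 1)).prod := by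
  unfold nfiA_inner
  by_cases h : i < shape.length - 1
  · rw [if_pos h]
    have hrange : List.range' (i + 1) (shape.length - (i + 1)) =
        (List.range (shape.length - (i + 1))).map (fun k => (i + 1) + k) := by
      rw [List.range'_eq_map_range]
    have hmap : (List.range (shape.length - (i + 1))).map
        (fun k => shape.getD ((i + 1) + k) 0) = shape.drop (i + 1) := by
      have hlen : (shape.drop (i + 1)).length = shape.length - (i + 1) := by
        simp
      have hmgr := map_getD_range (shape.drop (i + 1))
      rw [hlen] at hmgr
      calc (List.range (shape.length - (i + 1))).map (fun k => shape.getD ((i + 1) + k) 0)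
          = (List.range (shape.length - (i + 1))).map (fun k => (shape.drop (i + 1)).getD k 0) := by
            apply List.map_congr_left; intro k hk
            rw [List.getD_eq_getElem?_getD, List.getD_eq_getElem?_getD,
              List.getElem?_drop]
        _ = shape.drop (i + 1) := hmgr
    calc (List.range' (i + 1) (shape.length - (i + 1))).foldl (fun t j => t * shape.getD j 0) 1
        = ((List.range (shape.length - (i + 1))).map (fun k => (i + 1) + k)).foldl
            (fun t j => t * shape.getD j 0) 1 := by rw [hrange]
      _ = (List.range (shape.length - (i + 1))).foldl
            (fun t k => t * shape.getD ((i + 1) + k) 0) 1 := by rw [List.foldl_map]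
      _ = ((List.range (shape.length - (i + 1))).map (fun k => shape.getD ((i + 1) + k) 0)).foldl
            (· * ·) 1 := by rw [List.foldl_map]
      _ = (shape.drop (i + 1)).foldl (· * ·) 1 := by rw [hmap]
      _ = (shape.drop (i + 1)).prod := foldl_mul_eq_prod _
  · rw [if_neg h]
    have hd : shape.drop (i + 1) = [] := by
      apply List.drop_eq_nil_of_le; omega
    rw [hd]; rfl

theorem map_prod_drop : ∀ (l : List Int),
    (List.range l.length).map (fun i => (l.drop (i + 1)).prod) = nfiStrides l := by
  intro l
  induction l with
  | nil => rfl
  | cons a t ih =>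
    simp only [List.length_cons, List.range_succ_eq_map, List.map_cons, List.map_map,
      List.drop_succ_cons, List.drop_zero, nfiStrides]
    refine congrArg (t.prod :: ·) ?_
    rw [← ih]
    apply List.map_congr_left
    intro i _
    simp

theorem arraySize_eq_strides (shape : List Int) :
    (List.range shape.length).map (fun i => nfiA_inner shape i shape.length) =
      nfiStrides shape := by
  have h1 : ∀ i ∈ List.range shape.length,
      nfiA_inner shape i shape.length = (shape.drop (i + 1)).prod := by
    intro i hi
    exact inner_eq_prod_drop shape i (List.mem_range.mp hi)
  rw [List.map_congr_left h1, map_prod_drop]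

-- B's first fold produces the reversed strides (scaled by the running accumulator)
theorem nfiStrides_snoc (u : List Int) (a : Int) :
    nfiStrides (u ++ [a]) = (nfiStrides u).map (· * a) ++ [(1 : Int)] := by
  induction u with
  | nil => simp [nfiStrides]
  | cons b v ihv =>
    simp only [List.cons_append, nfiStrides, ihv, List.map_cons]
    simp [mul_comm]

theorem b_fold_spec : ∀ (l : List Int) (pre : List Int) (acc : Int),
    (l.foldl (fun (st : List Int × Int) size => (st.1 ++ [st.2], st.2 * size)) (pre, acc)).1 =
      pre ++ (nfiStrides l.reverse).reverse.map (· * acc) := by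
  intro l
  induction l with
  | nil => intro pre acc; simp [nfiStrides]
  | cons a t ih =>
    intro pre acc
    simp only [List.foldl_cons]
    rw [ih]
    simp only [List.reverse_cons, nfiStrides_snoc, List.reverse_append, List.map_reverse,
      List.map_map, List.map_cons, List.reverse_cons, List.reverse_nil,
      List.nil_append, List.singleton_append, List.append_assoc]
    simp [mul_comm, mul_left_comm]

-- join over '-' appending one part
theorem join_append_one (x : List Char) : ∀ (parts : List (List Char)), parts ≠ [] →
    PySem.Chars.join ['-'] (parts ++ [x]) = PySem.Chars.join ['-'] parts ++ '-' :: x := by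
  intro parts
  induction parts with
  | nil => intro h; exact absurd rfl h
  | cons p t ih =>
    intro _
    cases t with
    | nil => simp [PySem.Chars.join_cons_cons, PySem.Chars.join_singleton]
    | cons q u =>
      have := ih (by simp)
      simp only [List.cons_append, PySem.Chars.join_cons_cons] at *
      rw [this]; simp

-- the two second loops agree over any shared strides list
theorem second_loop_eq : ∀ (sl : List Int) (idx : Int) (parts : List (List Char)),
    parts ≠ [] →
    (sl.foldl (fun (st : Int × List Char) sz =>
        (st.1 - PySem.Int.floordiv st.1 sz * sz,
         st.2 ++ '-' :: PySem.Int.toChars (PySem.Int.floordiv st.1 sz)))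
      (idx, PySem.Chars.join ['-'] parts)).2 =
    PySem.Chars.join ['-'] ((sl.foldl (fun (st : List (List Char) × Int) stride =>
        (st.1 ++ [PySem.Int.toChars (PySem.Int.floordiv st.2 stride)],
         PySem.Int.mod st.2 stride)) (parts, idx)).1) := by
  intro sl
  induction sl with
  | nil => intro idx parts _; rfl
  | cons sz rest ih =>
    intro idx parts hne
    simp only [List.foldl_cons]
    have hmod : idx - PySem.Int.floordiv idx sz * sz = PySem.Int.mod idx sz := by
      have := PySem.Int.floordiv_mul_add_mod idx sz
      omega
    rw [hmod, ← join_append_one _ parts hne]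
    exact ih (PySem.Int.mod idx sz) (parts ++ [PySem.Int.toChars (PySem.Int.floordiv idx sz)])
      (by simp)

-- ===== VERDICT (by name: the statement is the Claim_ definition above) =====
theorem name_from_index_py_spec : Claim_equal_name_from_index_py := by
  intro name index shape _ _
  unfold Spec_name_from_index_py name_from_index_py name_from_index_py_alt
  have hA : (List.range shape.length).foldl
      (fun acc i => acc ++ [nfiA_inner shape i shape.length]) [] = nfiStrides shape := by
    rw [foldl_push_eq_map, List.nil_append, arraySize_eq_strides]
  have hB : (shape.reverse.foldl
      (fun (st : List Int × Int) size => (st.1 ++ [st.2], st.2 * size)) ([], 1)).1.reverse =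
      nfiStrides shape := by
    rw [b_fold_spec shape.reverse [] 1]
    simp
  simp only [hA, hB]
  have hlen : shape.length = (nfiStrides shape).length := (nfiStrides_length shape).symm
  rw [hlen]
  have h2 : (List.range (nfiStrides shape).length).foldl (fun (st : Int × List Char) i =>
        (st.1 - PySem.Int.floordiv st.1 ((nfiStrides shape).getD i 0) *
            (nfiStrides shape).getD i 0,
         st.2 ++ '-' :: PySem.Int.toChars
            (PySem.Int.floordiv st.1 ((nfiStrides shape).getD i 0))))
      (index, name.toList) =
      (nfiStrides shape).foldl (fun (st : Int × List Char) sz =>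
        (st.1 - PySem.Int.floordiv st.1 sz * sz,
         st.2 ++ '-' :: PySem.Int.toChars (PySem.Int.floordiv st.1 sz)))
      (index, name.toList) :=
    foldl_range_getD (fun (st : Int × List Char) sz =>
        (st.1 - PySem.Int.floordiv st.1 sz * sz,
         st.2 ++ '-' :: PySem.Int.toChars (PySem.Int.floordiv st.1 sz)))
      (nfiStrides shape) (index, name.toList)
  rw [h2]
  have h3 := second_loop_eq (nfiStrides shape) index [name.toList] (by simp)
  rw [PySem.Chars.join_singleton] at h3
  exact congrArg String.ofList h3
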